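-- pv_equiv track=rewrite | github.com/su-hwani/algorithm_study | 프로그래머스/2/42626. 더 맵게/더 맵게.py | solution
-- ===== SOURCE A (Python) =====
-- import heapq
--
-- def solution(scoville, K):
--     answer = 0
--     heapq.heapify(scoville)
--
--     while len(scoville) > 1:
--         worst = heapq.heappop(scoville)
--         if worst >= K:
--             break
--
--         worse = heapq.heappop(scoville)
--
--         mixed = worst + worse * 2
--
--         heapq.heappush(scoville, mixed)
--         answer += 1
--
--     worst = heapq.heappop(scoville)
--     if worst >= K:
--         return answer
--     else:
--         return -1
-- ===== SOURCE B (Python) =====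
-- def solution(scoville, K):
--     # Two-queue monotone-merge: sort once, then take minima by merging the sorted
--     # originals with a FIFO of mixed values (which come out in nondecreasing order
--     # for nonnegative spiciness), so no heap and no re-insertion is ever needed.
--     orig = sorted(scoville)
--     mixed = []
--     i = 0  # front of orig
--     j = 0  # front of mixed
--     answer = 0
--
--     def pop_smallest():
--         nonlocal i, j
--         if j < len(mixed) and (i >= len(orig) or mixed[j] <= orig[i]):
--             v = mixed[j]
--             j += 1
--         else:
--             v = orig[i]  # IndexError when both queues are empty, like A's heappop
--             i += 1
--         return v
--
--     while (len(orig) - i) + (len(mixed) - j) > 1: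
--         worst = pop_smallest()
--         if worst >= K:
--             break
--         worse = pop_smallest()
--         mixed.append(worst + worse * 2)
--         answer += 1
--
--     if pop_smallest() >= K:
--         return answer
--     return -1
-- ===== Notes on version B (the rewrite author's own statement) =====
-- stated objective: alternative
-- what changed: Replaces the binary min-heap with a two-queue monotone merge: sort once, then draw each minimum by merging the sorted originals with a FIFO queue of mixed values (provably emitted in nondecreasing order), so there is no heap and no re-insertion into the working structure; A heapifies its argument in place, B leaves it unmutated.
import Mathlib
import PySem

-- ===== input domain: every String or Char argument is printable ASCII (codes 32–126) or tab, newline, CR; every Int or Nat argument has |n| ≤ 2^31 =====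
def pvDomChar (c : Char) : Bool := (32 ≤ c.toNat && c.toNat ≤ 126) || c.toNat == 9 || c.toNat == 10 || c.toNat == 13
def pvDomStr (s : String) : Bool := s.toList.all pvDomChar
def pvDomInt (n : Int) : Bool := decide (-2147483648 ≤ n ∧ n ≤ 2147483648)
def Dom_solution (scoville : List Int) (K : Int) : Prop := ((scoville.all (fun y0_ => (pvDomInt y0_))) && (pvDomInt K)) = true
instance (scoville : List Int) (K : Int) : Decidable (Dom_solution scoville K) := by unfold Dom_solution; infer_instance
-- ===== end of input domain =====

-- B replaces A's binary min-heap by a two-queue monotone merge: sort once, then draw minima by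
-- merging the sorted originals with a FIFO queue of mixed values (provably nondecreasing), so no
-- heap and no re-insertion is needed. Equivalence is about the RETURN value only: A heapifies its
-- list argument in place, B does not mutate it.

-- ===== PORT A =====
-- heapq is modelled by its observable contract on the heap-as-multiset: heapify is the identity,
-- heappop returns the minimum element and removes one occurrence of it, heappush appends.
-- This is exact for the returned value: equal Ints are indistinguishable, so which internal
-- arrangement the heap has never affects what heappop returns.
def pyHeappop (l : List Int) : Int × List Int :=
  match PySem.List.min? l (fun x => x) with
  | some m => (m, ((PySem.List.remove? l m).getD l))
  | none => (0, l)   -- heappop of an empty heap: IndexError in Python; unreachable under Pre_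

theorem pyHeappop_length (l : List Int) (h : l ≠ []) : (pyHeappop l).2.length + 1 = l.length := by
  unfold pyHeappop
  rcases hm : PySem.List.min? l (fun x => x) with _ | m
  · exact absurd ((PySem.List.min?_eq_none_iff l _).mp hm) h
  · have hmem := PySem.List.min?_mem hm
    have hpos := List.length_pos_of_mem hmem
    simp [PySem.List.remove?_eq_some_erase l m hmem, List.length_erase_of_mem hmem]
    omega

def solLoopA (K : Int) (l : List Int) (answer : Int) : Int :=
  if h : 1 < l.length then
    let worst := (pyHeappop l).1
    if worst ≥ K then
      -- break, then the final heappop + comparison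
      if (pyHeappop (pyHeappop l).2).1 ≥ K then answer else -1
    else
      let worse := (pyHeappop (pyHeappop l).2).1
      let mixed := worst + worse * 2
      solLoopA K ((pyHeappop (pyHeappop l).2).2 ++ [mixed]) (answer + 1)
  else
    if (pyHeappop l).1 ≥ K then answer else -1
termination_by l.length
decreasing_by
  have h1 : l ≠ [] := by intro he; simp [he] at h
  have e1 := pyHeappop_length l h1
  have h2 : (pyHeappop l).2 ≠ [] := by
    intro he; rw [he] at e1; simp at e1; omega
  have e2 := pyHeappop_length _ h2
  simp; omega

def solution (scoville : List Int) (K : Int) : Int :=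
  solLoopA K scoville 0

-- ===== PORT B =====
-- pop_smallest: o is the unread suffix of the sorted originals (orig[i:]), q the unread suffix of
-- the mixed FIFO (mixed[j:]); advancing a pointer = dropping the head.  Mirrors the Python test
-- `j < len(mixed) and (i >= len(orig) or mixed[j] <= orig[i])`.
def popSmallest (o q : List Int) : Int × List Int × List Int :=
  match q, o with
  | m :: qt, a :: ot => if m ≤ a then (m, a :: ot, qt) else (a, ot, m :: qt)
  | m :: qt, [] => (m, [], qt)
  | [], a :: ot => (a, ot, [])
  | [], [] => (0, [], [])   -- orig[i] on empty queues: IndexError in Python; unreachable under Pre_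

theorem popSmallest_length (o q : List Int) (h : o.length + q.length ≠ 0) :
    (popSmallest o q).2.1.length + (popSmallest o q).2.2.length + 1 = o.length + q.length := by
  match q, o with
  | m :: qt, a :: ot =>
    by_cases hle : m ≤ a <;> simp [popSmallest, hle] <;> omega
  | m :: qt, [] => simp [popSmallest]
  | [], a :: ot => simp [popSmallest]
  | [], [] => simp at h

def solLoopB (K : Int) (o q : List Int) (answer : Int) : Int :=
  if h : 1 < o.length + q.length then
    let p1 := popSmallest o q
    if p1.1 ≥ K then
      -- break, then the final pop_smallest + comparison
      if (popSmallest p1.2.1 p1.2.2).1 ≥ K then answer else -1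
    else
      let p2 := popSmallest p1.2.1 p1.2.2
      solLoopB K p2.2.1 (p2.2.2 ++ [p1.1 + p2.1 * 2]) (answer + 1)
  else
    if (popSmallest o q).1 ≥ K then answer else -1
termination_by o.length + q.length
decreasing_by
  have e1 := popSmallest_length o q (by omega)
  have e2 := popSmallest_length (popSmallest o q).2.1 (popSmallest o q).2.2 (by omega)
  simp only [List.length_append, List.length_cons, List.length_nil]
  omega

def solution_alt (scoville : List Int) (K : Int) : Int :=
  solLoopB K (PySem.List.sorted scoville (fun x => x) false) [] 0

-- ===== PRECONDITION & SPEC =====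
-- Pre_ excludes only the empty list, on which both A and B raise IndexError.
def Pre_solution (scoville : List Int) (K : Int) : Prop := scoville ≠ []
instance (scoville : List Int) (K : Int) : Decidable (Pre_solution scoville K) := by unfold Pre_solution; infer_instance
def pvWitness_solution : List Int × Int := ([1, 2, 3, 9, 10, 12], 7)
def Spec_solution (scoville : List Int) (K : Int) (out : Int) : Prop := out = solution_alt scoville K
instance (scoville : List Int) (K : Int) (out : Int) : Decidable (Spec_solution scoville K out) := by unfold Spec_solution; infer_instance

-- ===== CLAIM (what is proved, stated in full; the proofs are below) =====
def Claim_equal_solution : Prop := ∀ (scoville : List Int) (K : Int), Dom_solution scoville K → Pre_solution scoville K → Spec_solution scoville K (solution scoville K)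

-- ===== LEMMAS AND PROOFS =====

-- mergeQ o q : the sorted merge of the two queues, following popSmallest's tie-break.
def mergeQ : List Int → List Int → List Int
  | o, [] => o
  | [], m :: qt => m :: qt
  | a :: ot, m :: qt => if m ≤ a then m :: mergeQ (a :: ot) qt else a :: mergeQ ot (m :: qt)
termination_by o q => o.length + q.length

theorem mergeQ_perm (o q : List Int) : (mergeQ o q).Perm (o ++ q) := by
  fun_induction mergeQ o q with
  | case1 o => simp
  | case2 m qt => simp
  | case3 a ot m qt hle ih =>
    exact (ih.cons m).trans (List.perm_middle (a := m) (l₁ := a :: ot) (l₂ := qt)).symm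
  | case4 a ot m qt hle ih =>
    exact (ih.cons a)

theorem mergeQ_pairwise (o q : List Int) (ho : o.Pairwise (· ≤ ·)) (hq : q.Pairwise (· ≤ ·)) :
    (mergeQ o q).Pairwise (· ≤ ·) := by
  fun_induction mergeQ o q with
  | case1 o => exact ho
  | case2 m qt => exact hq
  | case3 a ot m qt hle ih =>
    refine List.pairwise_cons.mpr ⟨?_, ih ho (List.pairwise_cons.mp hq).2⟩
    intro y hy
    rcases List.mem_append.mp ((mergeQ_perm (a :: ot) qt).mem_iff.mp hy) with h | h
    · rcases List.mem_cons.mp h with rfl | h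
      · exact hle
      · exact le_trans hle ((List.pairwise_cons.mp ho).1 y h)
    · exact (List.pairwise_cons.mp hq).1 y h
  | case4 a ot m qt hle ih =>
    refine List.pairwise_cons.mpr ⟨?_, ih (List.pairwise_cons.mp ho).2 hq⟩
    intro y hy
    rcases List.mem_append.mp ((mergeQ_perm ot (m :: qt)).mem_iff.mp hy) with h | h
    · exact (List.pairwise_cons.mp ho).1 y h
    · rcases List.mem_cons.mp h with rfl | h
      · omega
      · exact le_trans (by omega) ((List.pairwise_cons.mp hq).1 y h)

-- popSmallest pops exactly the head of the merge, leaving tails of the two queues.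
theorem popSmallest_merge (o q : List Int) (a : Int) (rest : List Int)
    (h : mergeQ o q = a :: rest) :
    (popSmallest o q).1 = a ∧
      mergeQ (popSmallest o q).2.1 (popSmallest o q).2.2 = rest ∧
      (popSmallest o q).2.1.Sublist o ∧ (popSmallest o q).2.2.Sublist q := by
  match q, o with
  | m :: qt, b :: ot =>
    by_cases hle : m ≤ b
    · simp only [mergeQ, if_pos hle] at h
      injection h with h1 h2
      subst h1
      simp [popSmallest, if_pos hle, h2]
    · simp only [mergeQ, if_neg hle] at h
      injection h with h1 h2
      subst h1
      simp [popSmallest, if_neg hle, h2]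
  | m :: qt, [] =>
    simp only [mergeQ] at h
    injection h with h1 h2
    subst h1; subst h2
    cases qt <;> simp [popSmallest, mergeQ]
  | [], b :: ot =>
    simp only [mergeQ] at h
    injection h with h1 h2
    subst h1; subst h2
    simp [popSmallest, mergeQ]
  | [], [] => simp [mergeQ] at h

-- heappop of a list whose sorted order is a :: t: the popped value is a (the minimum), and the
-- remaining multiset sorts to t.
theorem pyHeappop_spec (l : List Int) (a : Int) (t : List Int)
    (hs : PySem.List.sorted l (fun x => x) false = a :: t) :
    (pyHeappop l).1 = a ∧
      PySem.List.sorted (pyHeappop l).2 (fun x => x) false = t := by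
  have hperm : (a :: t).Perm l := by
    rw [← hs]; exact PySem.List.sorted_perm l (fun x => x) false
  have hal : a ∈ l := hperm.mem_iff.mp (List.mem_cons_self)
  have hmin := PySem.List.key_head_sorted_le l (fun x => x) hs
  rcases hm : PySem.List.min? l (fun x => x) with _ | m
  · exact absurd ((PySem.List.min?_eq_none_iff l _).mp hm)
      (by intro he; rw [he] at hal; exact absurd hal (List.not_mem_nil))
  · have hma : m = a :=
      le_antisymm (PySem.List.min?_isMin hm a hal) (hmin m (PySem.List.min?_mem hm))
    subst hma
    have hpop : pyHeappop l = (m, l.erase m) := by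
      unfold pyHeappop
      rw [hm]
      simp [PySem.List.remove?_eq_some_erase l m hal]
    refine ⟨by rw [hpop], ?_⟩
    rw [hpop]
    have hperm' : t.Perm (l.erase m) := by
      have := hperm.erase m
      simpa using this
    have hpair : (m :: t).Pairwise (fun p q : Int => p ≤ q) := by
      rw [← hs]; exact PySem.List.sorted_pairwise l (fun x => x)
    exact PySem.List.sorted_id_eq_of_perm_of_pairwise _ _ hperm' (List.pairwise_cons.mp hpair).2

-- goodQ S q : each queue entry is ≤ x + 2y for any two available elements x ≤ y, where "available"
-- means S plus the entries pushed before it.  This is what keeps the mixed FIFO nondecreasing.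
def goodQ (S : List Int) : List Int → Prop
  | [] => True
  | u :: rest => (∀ x ∈ S, ∀ y ∈ S, x ≤ y → u ≤ x + 2 * y) ∧ goodQ (u :: S) rest

theorem goodQ_mono (q : List Int) : ∀ (S S' : List Int), (∀ x ∈ S', x ∈ S) → goodQ S q → goodQ S' q := by
  induction q with
  | nil => intro S S' _ _; trivial
  | cons u rest ih =>
    intro S S' hsub hg
    exact ⟨fun x hx y hy hxy => hg.1 x (hsub x hx) y (hsub y hy) hxy,
      ih (u :: S) (u :: S')
        (fun x hx => (List.mem_cons.mp hx).elim
          (fun he => he ▸ List.mem_cons_self)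
          (fun hx' => List.mem_cons_of_mem _ (hsub x hx'))) hg.2⟩

-- popping preserves goodQ, with the popped value kept among the available elements.
theorem goodQ_pop (S o q : List Int) (h : goodQ (S ++ o) q) :
    goodQ (S ++ (popSmallest o q).1 :: (popSmallest o q).2.1) (popSmallest o q).2.2 := by
  match q, o with
  | m :: qt, a :: ot =>
    by_cases hle : m ≤ a
    · simp only [popSmallest, if_pos hle]
      refine goodQ_mono qt _ _ ?_ h.2
      intro x hx
      rcases List.mem_append.mp hx with hx | hx
      · exact List.mem_cons_of_mem _ (List.mem_append_left _ hx)
      · rcases List.mem_cons.mp hx with rfl | hx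
        · exact List.mem_cons_self
        · exact List.mem_cons_of_mem _ (List.mem_append_right _ hx)
    · simpa only [popSmallest, if_neg hle] using h
  | m :: qt, [] =>
    simp only [popSmallest]
    refine goodQ_mono qt _ _ ?_ h.2
    intro x hx
    rcases List.mem_append.mp hx with hx | hx
    · exact List.mem_cons_of_mem _ (List.mem_append_left _ hx)
    · simp only [List.mem_cons, List.not_mem_nil, or_false] at hx
      subst hx; exact List.mem_cons_self
  | [], a :: ot => simpa only [popSmallest] using h
  | [], [] => trivial

theorem goodQ_elem (q : List Int) : ∀ (S : List Int), goodQ S q → ∀ u ∈ q, ∀ x ∈ S, ∀ y ∈ S, x ≤ y → u ≤ x + 2 * y := by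
  induction q with
  | nil => intro S _ u hu; exact absurd hu (List.not_mem_nil)
  | cons v rest ih =>
    intro S hg u hu x hx y hy hxy
    rcases List.mem_cons.mp hu with rfl | hu
    · exact hg.1 x hx y hy hxy
    · exact ih (v :: S) hg.2 u hu x (List.mem_cons_of_mem _ hx) y (List.mem_cons_of_mem _ hy) hxy

theorem goodQ_push (q : List Int) : ∀ (S : List Int) (m : Int), goodQ S q →
    (∀ x, (x ∈ S ∨ x ∈ q) → ∀ y, (y ∈ S ∨ y ∈ q) → x ≤ y → m ≤ x + 2 * y) →
    goodQ S (q ++ [m]) := by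
  induction q with
  | nil =>
    intro S m _ hb
    exact ⟨fun x hx y hy hxy => hb x (Or.inl hx) y (Or.inl hy) hxy, trivial⟩
  | cons v rest ih =>
    intro S m hg hb
    refine ⟨hg.1, ih (v :: S) m hg.2 ?_⟩
    intro x hx y hy hxy
    refine hb x ?_ y ?_ hxy
    · rcases hx with hx | hx
      · rcases List.mem_cons.mp hx with rfl | hx
        · exact Or.inr List.mem_cons_self
        · exact Or.inl hx
      · exact Or.inr (List.mem_cons_of_mem _ hx)
    · rcases hy with hy | hy
      · rcases List.mem_cons.mp hy with rfl | hy
        · exact Or.inr List.mem_cons_self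
        · exact Or.inl hy
      · exact Or.inr (List.mem_cons_of_mem _ hy)

theorem loop_eq (K : Int) : ∀ (n : Nat) (l o q : List Int), l.length ≤ n →
    l.Perm (o ++ q) → o.Pairwise (· ≤ ·) → q.Pairwise (· ≤ ·) → goodQ o q →
    ∀ ans, solLoopA K l ans = solLoopB K o q ans := by
  intro n
  induction n with
  | zero =>
    intro l o q hl hperm ho hq hg ans
    have hl0 : l = [] := List.length_eq_zero_iff.mp (Nat.le_zero.mp hl)
    subst hl0
    have hoq : o ++ q = [] := (hperm.symm.eq_nil)
    rcases List.append_eq_nil_iff.mp hoq with ⟨rfl, rfl⟩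
    simp [solLoopA, solLoopB, pyHeappop, popSmallest, PySem.List.min?]
  | succ n ih =>
    intro l o q hl hperm ho hq hg ans
    have hlen : l.length = o.length + q.length := by simpa using hperm.length_eq
    have hsM : PySem.List.sorted l (fun x => x) false = mergeQ o q :=
      PySem.List.sorted_id_eq_of_perm_of_pairwise _ _
        ((mergeQ_perm o q).trans hperm.symm) (mergeQ_pairwise o q ho hq)
    rcases hM : mergeQ o q with _ | ⟨a, t⟩
    · -- empty: both final-pop the sentinel
      have hoq : o ++ q = [] := by
        have h0 := (mergeQ_perm o q).symm
        rw [hM] at h0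
        exact h0.eq_nil
      rcases List.append_eq_nil_iff.mp hoq with ⟨rfl, rfl⟩
      have hl0 : l = [] := hperm.eq_nil
      subst hl0
      simp [solLoopA, solLoopB, pyHeappop, popSmallest, PySem.List.min?]
    rw [hM] at hsM
    rcases t with _ | ⟨b, rest⟩
    · -- one element left: both do the final pop, value a
      have hlen1 : l.length = 1 := by
        have := (mergeQ_perm o q).length_eq
        rw [hM] at this; simp at this; omega
      obtain ⟨hp1, _⟩ := pyHeappop_spec l a [] hsM
      obtain ⟨hb1, _, _, _⟩ := popSmallest_merge o q a [] hM
      rw [solLoopA, dif_neg (by omega), hp1, solLoopB, dif_neg (by omega), hb1]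
    · -- at least two: pop a then b on both sides
      have hlen2 : l.length = rest.length + 2 := by
        have := (mergeQ_perm o q).length_eq
        rw [hM] at this; simp at this; omega
      have hMpair : (a :: b :: rest).Pairwise (fun p q : Int => p ≤ q) := by
        rw [← hM]; exact mergeQ_pairwise o q ho hq
      have hab : a ≤ b := (List.pairwise_cons.mp hMpair).1 b List.mem_cons_self
      have hbrest : ∀ e ∈ rest, b ≤ e :=
        (List.pairwise_cons.mp (List.pairwise_cons.mp hMpair).2).1
      -- A side: two heappops
      obtain ⟨hp1, hs1⟩ := pyHeappop_spec l a (b :: rest) hsM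
      have hne1 : (pyHeappop l).2 ≠ [] := by
        have := pyHeappop_length l (by intro he; rw [he] at hlen2; simp at hlen2)
        intro he; rw [he] at this; simp at this; omega
      obtain ⟨hp2, hs2⟩ := pyHeappop_spec (pyHeappop l).2 b rest hs1
      -- B side: two popSmallests
      obtain ⟨hb1, hm1, hso1, hsq1⟩ := popSmallest_merge o q a (b :: rest) hM
      obtain ⟨hb2, hm2, hso2, hsq2⟩ :=
        popSmallest_merge (popSmallest o q).2.1 (popSmallest o q).2.2 b rest hm1
      rw [solLoopA, dif_pos (by omega), hp1, solLoopB, dif_pos (by omega)]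
      simp only [hb1]
      by_cases hK : a ≥ K
      · rw [if_pos hK, if_pos hK, hp2, hb2]
      · rw [if_neg hK, if_neg hK]
        simp only [hb2, hp2]
        -- names for the B-state after the two pops
        set o1 := (popSmallest o q).2.1 with ho1def
        set q1 := (popSmallest o q).2.2 with hq1def
        set o2 := (popSmallest o1 q1).2.1 with ho2def
        set q2 := (popSmallest o1 q1).2.2 with hq2def
        set m := a + b * 2 with hmdef
        -- goodQ chain: after both pops, a and b stay available
        have hg1 : goodQ (a :: o1) q1 := by
          have := goodQ_pop [] o q (by simpa using hg)
          simpa [hb1] using this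
        have hg2 : goodQ (a :: b :: o2) q2 := by
          have := goodQ_pop [a] o1 q1 (by simpa using hg1)
          simpa [hb2] using this
        -- every surviving queue element is ≤ m
        have hq2m : ∀ u ∈ q2, u ≤ m := by
          intro u hu
          have := goodQ_elem q2 (a :: b :: o2) hg2 u hu a List.mem_cons_self b
            (List.mem_cons_of_mem _ List.mem_cons_self) hab
          omega
        -- the remaining multiset: o2 ++ q2 ~ rest
        have hperm2 : (o2 ++ q2).Perm rest := by
          have := mergeQ_perm o2 q2
          rw [hm2] at this; exact this.symm
        have hrest_lb : ∀ e ∈ o2 ++ q2, b ≤ e := fun e he => hbrest e (hperm2.mem_iff.mp he)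
        -- invariants for the recursive call
        have honew : o2.Pairwise (fun p q : Int => p ≤ q) :=
          ho.sublist (hso2.trans hso1)
        have hqnew : (q2 ++ [m]).Pairwise (fun p q : Int => p ≤ q) := by
          refine List.pairwise_append.mpr ⟨hq.sublist (hsq2.trans hsq1), List.pairwise_singleton _ _, ?_⟩
          intro x hx y hy
          simp only [List.mem_singleton] at hy
          subst hy
          exact hq2m x hx
        have hgnew : goodQ o2 (q2 ++ [m]) := by
          refine goodQ_push q2 o2 m
            (goodQ_mono q2 _ _ (fun x hx => List.mem_cons_of_mem _ (List.mem_cons_of_mem _ hx)) hg2) ?_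
          intro x hx y hy hxy
          have hxb : b ≤ x := hrest_lb x (List.mem_append.mpr hx)
          have hyb : b ≤ y := hrest_lb y (List.mem_append.mpr hy)
          omega
        -- the A state after the step
        have hpermnew : ((pyHeappop (pyHeappop l).2).2 ++ [m]).Perm (o2 ++ (q2 ++ [m])) := by
          have hl2 : (pyHeappop (pyHeappop l).2).2.Perm rest := by
            have hp := (PySem.List.sorted_perm (pyHeappop (pyHeappop l).2).2 (fun x : Int => x) false).symm
            rw [hs2] at hp
            exact hp
          have := (hl2.trans hperm2.symm).append_right [m]
          simpa [List.append_assoc] using this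
        have hlnew : ((pyHeappop (pyHeappop l).2).2 ++ [m]).length ≤ n := by
          have e1 := pyHeappop_length l (by intro he; rw [he] at hlen2; simp at hlen2)
          have e2 := pyHeappop_length _ hne1
          simp only [List.length_append, List.length_cons, List.length_nil]
          omega
        exact ih _ o2 (q2 ++ [m]) hlnew hpermnew honew hqnew hgnew (ans + 1)

-- ===== VERDICT (by name: the statement is the Claim_ definition above) =====
theorem solution_spec : Claim_equal_solution := by
  intro scoville K _ hpre
  unfold Spec_solution solution solution_alt
  refine loop_eq K scoville.length scoville (PySem.List.sorted scoville (fun x => x) false) []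
    le_rfl ?_ ?_ (List.Pairwise.nil) trivial 0
  · simpa using (PySem.List.sorted_perm scoville (fun x => x) false).symm
  · exact PySem.List.sorted_pairwise scoville (fun x => x)
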